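-- pv_equiv track=rewrite | github.com/sasha01zuev/VazonezArbitrageBot | handlers/users/settings/blacklist_coin_for_exchange.py | format_blacklist_message
-- ===== SOURCE A (Python) =====
-- TELEGRAM_MESSAGE_LIMIT = 4096
--
-- ELLIPSIS = "..."
--
-- def format_blacklist_message(blacklist_coins: list[str], header_text: str) -> str:
--     header = header_text
--     base_length = len(header)
--     coin_for_exchange_text = ""
--     total_length = base_length
--
--     for i, coin in enumerate(blacklist_coins):
--         # добавляем запятую и пробел, если это не первая монета
--         separator = ", " if i > 0 else ""
--         part = f"<b>{separator}{coin}</b>"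
--         new_length = total_length + len(part)
--
--         # если следующая монета не влезает — добавляем многоточие и выходим
--         if new_length + len(ELLIPSIS) > TELEGRAM_MESSAGE_LIMIT:
--             coin_for_exchange_text += ELLIPSIS
--             break
--
--         coin_for_exchange_text += part
--         total_length = new_length
--
--     return header + coin_for_exchange_text
-- ===== SOURCE B (Python) =====
-- from itertools import accumulate
-- from bisect import bisect_right
--
-- TELEGRAM_MESSAGE_LIMIT = 4096
--
-- ELLIPSIS = "..."
--
-- def format_blacklist_message(blacklist_coins: list[str], header_text: str) -> str:
--     parts = [f"<b>{', ' if i > 0 else ''}{coin}</b>"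
--              for i, coin in enumerate(blacklist_coins)]
--     cums = list(accumulate((len(p) for p in parts), initial=len(header_text)))
--     k = max(0, bisect_right(cums, TELEGRAM_MESSAGE_LIMIT - len(ELLIPSIS)) - 1)
--     tail = ELLIPSIS if k < len(parts) else ""
--     return header_text + "".join(parts[:k]) + tail
-- ===== Notes on version B (the rewrite author's own statement) =====
-- stated objective: alternative
-- what changed: Replaces A's single accumulate-and-break loop (running total, ellipsis appended on first overflow) by building the bolded parts list, a prefix-sum table of cumulative lengths (itertools.accumulate with initial=len(header)), a bisect_right search for the number k of fitting parts, and a final header + ''.join(parts[:k]) + optional ellipsis.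
import Mathlib
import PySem

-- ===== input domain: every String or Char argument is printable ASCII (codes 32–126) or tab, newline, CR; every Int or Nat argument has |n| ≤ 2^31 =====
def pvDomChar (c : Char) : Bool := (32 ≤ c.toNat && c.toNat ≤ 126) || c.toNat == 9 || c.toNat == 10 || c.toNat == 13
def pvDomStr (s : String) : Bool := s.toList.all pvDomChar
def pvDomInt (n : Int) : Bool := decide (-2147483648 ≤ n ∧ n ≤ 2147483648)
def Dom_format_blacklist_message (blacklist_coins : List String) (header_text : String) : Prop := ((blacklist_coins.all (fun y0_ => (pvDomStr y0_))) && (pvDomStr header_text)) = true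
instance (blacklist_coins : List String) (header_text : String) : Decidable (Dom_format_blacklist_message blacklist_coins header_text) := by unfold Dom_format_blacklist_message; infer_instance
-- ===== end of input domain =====

-- B replaces A's running accumulate-and-break loop by a prefix-sum table of part lengths
-- searched with bisect_right (objective: alternative decomposition, not claimed faster).

-- the bolded part built for enumerate entry (i, coin): f"<b>{', ' if i > 0 else ''}{coin}</b>"
-- (identical expression in A and B, so both ports share it)
def fbmPart (p : Int × String) : String :=
  "<b>" ++ (if p.1 > 0 then ", " else "") ++ p.2 ++ "</b>"

-- ===== PORT A =====
-- A's for-loop over enumerate(blacklist_coins) with state (coin_for_exchange_text, total_length); 'break' = return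
def fbmLoopA : List (Int × String) → String → Int → String
  | [], text, _ => text
  | p :: rest, text, total =>
    let part := fbmPart p
    let newLength := total + PySem.Str.len part
    if newLength + PySem.Str.len "..." > 4096 then text ++ "..."
    else fbmLoopA rest (text ++ part) newLength

def format_blacklist_message (blacklist_coins : List String) (header_text : String) : String :=
  header_text ++ fbmLoopA (PySem.List.enumerate blacklist_coins) "" (PySem.Str.len header_text)

-- ===== PORT B =====
def format_blacklist_message_alt (blacklist_coins : List String) (header_text : String) : String :=
  let parts := (PySem.List.enumerate blacklist_coins).map fbmPart
  -- accumulate(part lengths, initial=len(header_text))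
  let cums := List.scanl (· + ·) (PySem.Str.len header_text) (parts.map PySem.Str.len)
  let k : Int := max 0 ((PySem.List.bisectRight cums (4096 - PySem.Str.len "...") : Int) - 1)
  let tail := if k < (parts.length : Int) then "..." else ""
  -- parts[:k] with 0 ≤ k; "".join
  header_text ++ PySem.Str.join "" (PySem.List.slice parts none (some k)) ++ tail

-- ===== PRECONDITION & SPEC =====
def Spec_format_blacklist_message (blacklist_coins : List String) (header_text : String) (out : String) : Prop := out = format_blacklist_message_alt blacklist_coins header_text
instance (blacklist_coins : List String) (header_text : String) (out : String) : Decidable (Spec_format_blacklist_message blacklist_coins header_text out) := by unfold Spec_format_blacklist_message; infer_instance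

-- ===== CLAIM (what is proved, stated in full; the proofs are below) =====
def Claim_equal_format_blacklist_message : Prop := ∀ (blacklist_coins : List String) (header_text : String), Dom_format_blacklist_message blacklist_coins header_text → Spec_format_blacklist_message blacklist_coins header_text (format_blacklist_message blacklist_coins header_text)

-- ===== LEMMAS AND PROOFS =====

-- number of leading parts A's loop accepts starting from running length t
def fbmCount : Int → List String → Nat
  | _, [] => 0
  | t, p :: rest =>
    if t + PySem.Str.len p > 4093 then 0 else fbmCount (t + PySem.Str.len p) rest + 1

-- A's loop restated over the pre-built parts
def fbmLoopP : List String → String → Int → String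
  | [], text, _ => text
  | p :: rest, text, total =>
    if total + PySem.Str.len p + PySem.Str.len "..." > 4096 then text ++ "..."
    else fbmLoopP rest (text ++ p) (total + PySem.Str.len p)

lemma str_toList_inj {a b : String} (h : a.toList = b.toList) : a = b := by
  have := congrArg String.ofList h; simpa using this

lemma join_empty_cons (x : String) (xs : List String) :
    PySem.Str.join "" (x :: xs) = x ++ PySem.Str.join "" xs := by
  apply str_toList_inj
  simp [PySem.Str.join, PySem.Chars.join, List.intercalate]
  cases xs <;> simp

lemma join_empty_nil : PySem.Str.join "" ([] : List String) = "" := by decide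

lemma len3 : PySem.Str.len "..." = 3 := by decide

lemma len_nonneg (s : String) : 0 ≤ PySem.Str.len s := by
  rw [PySem.Str.len_eq]; exact Int.natCast_nonneg _

lemma fbmLoopA_eq_loopP (l : List (Int × String)) (text : String) (total : Int) :
    fbmLoopA l text total = fbmLoopP (l.map fbmPart) text total := by
  induction l generalizing text total with
  | nil => rfl
  | cons p rest ih =>
    simp only [fbmLoopA, fbmLoopP, List.map_cons]
    split
    · rfl
    · exact ih _ _

lemma fbmLoopP_closed (ps : List String) (text : String) (t : Int) :
    fbmLoopP ps text t =
      text ++ PySem.Str.join "" (ps.take (fbmCount t ps)) ++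
        (if fbmCount t ps < ps.length then "..." else "") := by
  induction ps generalizing text t with
  | nil => simp [fbmLoopP, fbmCount, join_empty_nil]
  | cons p rest ih =>
    by_cases hc : t + PySem.Str.len p + PySem.Str.len "..." > 4096
    · have hcc : t + PySem.Str.len p > 4093 := by rw [len3] at hc; omega
      simp only [fbmLoopP, if_pos hc, fbmCount, if_pos hcc]
      simp [join_empty_nil]
    · have hcc : ¬ (t + PySem.Str.len p > 4093) := by rw [len3] at hc; omega
      simp only [fbmLoopP, if_neg hc, fbmCount, if_neg hcc]
      rw [ih (text ++ p) (t + PySem.Str.len p)]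
      simp only [List.take_succ_cons, join_empty_cons, List.length_cons,
        Nat.add_lt_add_iff_right]
      simp [String.append_assoc]

-- the getD form of bisect_right's characterization (proof-free indexing)
def BisectChar (cums : List Int) (x : Int) (m : Nat) : Prop :=
  m ≤ cums.length ∧ (∀ j, j < cums.length → j < m → cums.getD j 0 ≤ x) ∧
    (∀ j, j < cums.length → m ≤ j → x < cums.getD j 0)

lemma bisectRight_char (cums : List Int) (x : Int) (h : cums.Pairwise (· ≤ ·)) :
    BisectChar cums x (PySem.List.bisectRight cums x) := by
  obtain ⟨h1, h2, h3⟩ := PySem.List.bisectRight_spec cums x h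
  refine ⟨h1, fun j hj hjm => ?_, fun j hj hjm => ?_⟩
  · rw [List.getD_eq_getElem _ _ hj]; exact h2 j hj hjm
  · rw [List.getD_eq_getElem _ _ hj]; exact h3 j hj hjm

lemma bisect_unique (cums : List Int) (x : Int) (m₁ m₂ : Nat)
    (h₁ : BisectChar cums x m₁) (h₂ : BisectChar cums x m₂) : m₁ = m₂ := by
  obtain ⟨hl₁, hle₁, hgt₁⟩ := h₁
  obtain ⟨hl₂, hle₂, hgt₂⟩ := h₂
  by_contra hne
  rcases Nat.lt_or_ge m₁ m₂ with h | h
  · have := hle₂ m₁ (by omega) h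
    have := hgt₁ m₁ (by omega) (le_refl _)
    omega
  · have hlt : m₂ < m₁ := by omega
    have := hle₁ m₂ (by omega) hlt
    have := hgt₂ m₂ (by omega) (le_refl _)
    omega

-- elements of a prefix-sum list of nonnegative increments are ≥ the start
lemma scanl_ge (xs : List Int) (t : Int) (hx : ∀ x ∈ xs, 0 ≤ x) :
    ∀ y ∈ List.scanl (· + ·) t xs, t ≤ y := by
  induction xs generalizing t with
  | nil => simp
  | cons x rest ih =>
    intro y hy
    rw [List.scanl_cons] at hy
    rcases List.mem_cons.mp hy with h | h
    · omega
    · have h0 : 0 ≤ x := hx x (List.mem_cons_self ..)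
      have := ih (t + x) (fun z hz => hx z (List.mem_cons_of_mem _ hz)) y h
      omega

lemma scanl_pairwise (xs : List Int) (t : Int) (hx : ∀ x ∈ xs, 0 ≤ x) :
    (List.scanl (· + ·) t xs).Pairwise (· ≤ ·) := by
  induction xs generalizing t with
  | nil => simp
  | cons x rest ih =>
    rw [List.scanl_cons]
    refine List.pairwise_cons.mpr ⟨?_, ih (t + x) (fun z hz => hx z (List.mem_cons_of_mem _ hz))⟩
    intro y hy
    have h0 : 0 ≤ x := hx x (List.mem_cons_self ..)
    have := scanl_ge rest (t + x) (fun z hz => hx z (List.mem_cons_of_mem _ hz)) y hy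
    omega

-- fbmCount+1 (or 0 on an already-overflowing start) satisfies the characterization
lemma fbmCount_char (ps : List String) (t : Int) :
    BisectChar (List.scanl (· + ·) t (ps.map PySem.Str.len)) 4093
      (if t ≤ 4093 then fbmCount t ps + 1 else 0) := by
  induction ps generalizing t with
  | nil =>
    refine ⟨?_, ?_, ?_⟩
    · split_ifs <;> simp [fbmCount]
    · intro j hj hjm
      simp only [List.map_nil, List.scanl_nil, List.length_cons, List.length_nil] at hj
      interval_cases j
      split_ifs at hjm with h
      · simpa using h
      · omega
    · intro j hj hjm
      simp only [List.map_nil, List.scanl_nil, List.length_cons, List.length_nil] at hj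
      interval_cases j
      split_ifs at hjm with h
      · omega
      · simpa using by omega
  | cons p rest ih =>
    rw [List.map_cons, List.scanl_cons]
    have hp := len_nonneg p
    obtain ⟨ih1, ih2, ih3⟩ := ih (t + PySem.Str.len p)
    by_cases ht : t ≤ 4093
    · by_cases hfit : t + PySem.Str.len p ≤ 4093
      · rw [if_pos hfit] at ih1 ih2 ih3
        have hng : ¬ (t + PySem.Str.len p > 4093) := by omega
        have e1 : (if t ≤ 4093 then fbmCount t (p :: rest) + 1 else 0)
            = fbmCount (t + PySem.Str.len p) rest + 2 := by
          rw [if_pos ht]; simp only [fbmCount, if_neg hng]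
        rw [e1]
        refine ⟨?_, ?_, ?_⟩
        · simp only [List.length_cons]; omega
        · intro j hj hjm
          match j with
          | 0 => simpa using ht
          | j + 1 =>
            simp only [List.getD_cons_succ]
            exact ih2 j (by simp only [List.length_cons] at hj; omega) (by omega)
        · intro j hj hjm
          match j with
          | 0 => omega
          | j + 1 =>
            simp only [List.getD_cons_succ]
            exact ih3 j (by simp only [List.length_cons] at hj; omega) (by omega)
      · rw [if_neg hfit] at ih3
        have hng : t + PySem.Str.len p > 4093 := by omega
        have e1 : (if t ≤ 4093 then fbmCount t (p :: rest) + 1 else 0) = 1 := by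
          rw [if_pos ht]; simp only [fbmCount, if_pos hng]
        rw [e1]
        refine ⟨?_, ?_, ?_⟩
        · simp only [List.length_cons]; omega
        · intro j hj hjm
          match j with
          | 0 => simpa using ht
          | j + 1 => omega
        · intro j hj hjm
          match j with
          | 0 => omega
          | j + 1 =>
            simp only [List.getD_cons_succ]
            exact ih3 j (by simp only [List.length_cons] at hj; omega) (by omega)
    · have hfit : ¬ (t + PySem.Str.len p ≤ 4093) := by omega
      rw [if_neg hfit] at ih3
      rw [if_neg ht]
      refine ⟨by omega, by omega, ?_⟩
      intro j hj hjm
      match j with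
      | 0 => simpa using by omega
      | j + 1 =>
        simp only [List.getD_cons_succ]
        exact ih3 j (by simp only [List.length_cons] at hj; omega) (by omega)

lemma bisect_eq (ps : List String) (t : Int) :
    PySem.List.bisectRight (List.scanl (· + ·) t (ps.map PySem.Str.len)) 4093
      = if t ≤ 4093 then fbmCount t ps + 1 else 0 := by
  have hnn : ∀ x ∈ ps.map PySem.Str.len, 0 ≤ x := by
    intro x hx
    obtain ⟨s, _, rfl⟩ := List.mem_map.mp hx
    exact len_nonneg s
  exact bisect_unique _ 4093 _ _
    (bisectRight_char _ 4093 (scanl_pairwise (ps.map PySem.Str.len) t hnn))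
    (fbmCount_char ps t)

lemma fbmCount_zero_of_over (ps : List String) (t : Int) (ht : ¬ t ≤ 4093) :
    fbmCount t ps = 0 := by
  cases ps with
  | nil => rfl
  | cons p rest =>
    have := len_nonneg p
    simp only [fbmCount]
    rw [if_pos (by omega)]

-- ===== VERDICT (by name: the statement is the Claim_ definition above) =====
theorem format_blacklist_message_spec : Claim_equal_format_blacklist_message := by
  intro coins header _
  unfold Spec_format_blacklist_message format_blacklist_message format_blacklist_message_alt
  simp only [len3]
  set ps := (PySem.List.enumerate coins).map fbmPart with hps
  rw [fbmLoopA_eq_loopP, ← hps, fbmLoopP_closed]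
  have hb : (4096 : Int) - 3 = 4093 := by norm_num
  rw [hb, bisect_eq ps (PySem.Str.len header)]
  by_cases ht : PySem.Str.len header ≤ 4093
  · simp only [ht, if_pos]
    have hk : max 0 ((((fbmCount (PySem.Str.len header) ps + 1 : Nat) : Int)) - 1)
        = (fbmCount (PySem.Str.len header) ps : Int) := by
      push_cast; omega
    rw [hk, PySem.List.slice_to ps (Int.natCast_nonneg _)]
    simp [String.empty_append, Int.toNat_natCast, Nat.cast_lt]
    exact (String.append_assoc ..).symm
  · simp only [ht, if_neg, not_false_iff]
    rw [fbmCount_zero_of_over ps _ ht]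
    have h0 : max 0 (((0:Nat):Int) - 1) = (0:Int) := by norm_num
    rw [h0, PySem.List.slice_to ps (le_refl 0)]
    simp [join_empty_nil, String.empty_append]
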